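-- pv_equiv track=rewrite | github.com/pierrenicolas-suau-tfs/tracET | src/tracET/representation/graph_uts.py | count_paths_per_edges
-- ===== SOURCE A (Python) =====
-- def count_paths_per_edges(paths,edge):
--     """
--     given a list of paths, counts how many of them contains a given edge
--     :param paths: list of paths
--     :param edge: a network x edge
--     :return: count: number of paths that cross through edge
--     """
--     count=0
--     for path in paths:
--         for i in range(len(path)-1):
--             if (path[i] ==edge[0] and path [i+1] == edge[1]) or (path[i] ==edge[1] and path [i+1] == edge[0]):
--                 count +=1
--                 break
--     return (count)
-- ===== SOURCE B (Python) =====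
-- def count_paths_per_edges(paths, edge):
--     """
--     given a list of paths, counts how many of them contains a given edge
--     (direction-insensitive). Instead of scanning every adjacent pair, each
--     path is searched for occurrences of the endpoint edge[0] via list.index
--     (jumping from hit to hit) and only the neighbours of each hit are
--     inspected: edge is present iff some occurrence of edge[0] has edge[1]
--     right after it or right before it.
--     """
--     u, v = edge[0], edge[1]
--     count = 0
--     for path in paths:
--         if _crosses(path, u, v):
--             count += 1
--     return count
--
--
-- def _crosses(path, u, v):
--     n = len(path)
--     start = 0
--     while True:
--         try:
--             i = path.index(u, start)
--         except ValueError: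
--             return False
--         if (i + 1 < n and path[i + 1] == v) or (i > 0 and path[i - 1] == v):
--             return True
--         start = i + 1
-- ===== Notes on version B (the rewrite author's own statement) =====
-- stated objective: alternative
-- what changed: Replaces A's scan of every adjacent pair with an occurrence-jumping search: list.index repeatedly locates the next occurrence of edge[0] in the path and only that hit's two neighbours are compared with edge[1].
import Mathlib
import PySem

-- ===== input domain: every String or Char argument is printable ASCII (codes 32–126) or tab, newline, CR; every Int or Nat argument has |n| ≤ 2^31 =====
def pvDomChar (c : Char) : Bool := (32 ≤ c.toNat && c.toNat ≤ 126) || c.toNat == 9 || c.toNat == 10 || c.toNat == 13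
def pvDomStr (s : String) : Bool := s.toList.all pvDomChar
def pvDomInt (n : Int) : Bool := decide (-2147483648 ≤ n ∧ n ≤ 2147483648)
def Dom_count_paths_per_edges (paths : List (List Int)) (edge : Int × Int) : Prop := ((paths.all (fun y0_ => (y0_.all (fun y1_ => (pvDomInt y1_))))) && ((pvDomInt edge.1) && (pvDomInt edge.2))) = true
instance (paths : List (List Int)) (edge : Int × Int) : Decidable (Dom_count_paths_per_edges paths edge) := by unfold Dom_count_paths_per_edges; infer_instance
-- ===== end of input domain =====

-- B replaces A's scan of every adjacent pair with an occurrence-jumping search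
-- (list.index finds each occurrence of edge[0]; only its neighbours are compared
-- with edge[1]) — an alternative algorithm of the same asymptotic cost.


-- ===== PORT A =====
-- A's inner index loop over range(len(path)-1) with break: the obvious structural
-- recursion over the path, testing each adjacent pair in A's order, stopping at the first hit.
def pvScanA (e0 e1 : Int) : List Int → Bool
  | a :: b :: rest =>
      if (a == e0 && b == e1) || (a == e1 && b == e0) then true
      else pvScanA e0 e1 (b :: rest)
  | _ => false

def count_paths_per_edges (paths : List (List Int)) (edge : Int × Int) : Int :=
  paths.foldl (fun count path => count + (if pvScanA edge.1 edge.2 path then 1 else 0)) 0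

-- ===== PORT B =====
-- _crosses's while loop: path.index(u, start) = start + first index of u in path[start:]
-- (PySem.List.index? on the dropped prefix); on a ValueError (none) return false, on a hit
-- check the two neighbours, else continue from i+1.
def pvCrosses (path : List Int) (u v : Int) (start : Nat) : Bool :=
  match h : PySem.List.index? (path.drop start) u with
  | none => false
  | some j =>
      let i := start + j
      if (decide (i + 1 < path.length) && (path.getD (i + 1) 0 == v))
         || (decide (0 < i) && (path.getD (i - 1) 0 == v)) then true
      else pvCrosses path u v (i + 1)
termination_by path.length - start
decreasing_by
  have := PySem.List.getElem_of_index?_eq_some h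
  obtain ⟨hk, -, -⟩ := this
  simp [List.length_drop] at hk
  omega

def count_paths_per_edges_alt (paths : List (List Int)) (edge : Int × Int) : Int :=
  let u := edge.1
  let v := edge.2
  paths.foldl (fun count path => count + (if pvCrosses path u v 0 then 1 else 0)) 0

-- ===== PRECONDITION & SPEC =====
def Spec_count_paths_per_edges (paths : List (List Int)) (edge : Int × Int) (out : Int) : Prop := out = count_paths_per_edges_alt paths edge
instance (paths : List (List Int)) (edge : Int × Int) (out : Int) : Decidable (Spec_count_paths_per_edges paths edge out) := by unfold Spec_count_paths_per_edges; infer_instance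

-- ===== CLAIM (what is proved, stated in full; the proofs are below) =====
def Claim_equal_count_paths_per_edges : Prop := ∀ (paths : List (List Int)) (edge : Int × Int), Dom_count_paths_per_edges paths edge → Spec_count_paths_per_edges paths edge (count_paths_per_edges paths edge)

-- ===== LEMMAS AND PROOFS =====

-- 'some occurrence of u at m has v as a neighbour' — the condition B's loop searches for.
def pvMatchAt (path : List Int) (u v : Int) (m : Nat) : Prop :=
  m < path.length ∧ path.getD m 0 = u ∧
    ((m + 1 < path.length ∧ path.getD (m + 1) 0 = v) ∨ (0 < m ∧ path.getD (m - 1) 0 = v))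

-- A's scan finds exactly the adjacent pairs equal to (u,v) or (v,u).
theorem pvScanA_iff (u v : Int) (p : List Int) :
    pvScanA u v p = true ↔
      ∃ k, k + 1 < p.length ∧
        ((p.getD k 0 = u ∧ p.getD (k + 1) 0 = v) ∨ (p.getD k 0 = v ∧ p.getD (k + 1) 0 = u)) := by
  induction p with
  | nil => simp [pvScanA]
  | cons a rest ih =>
    cases rest with
    | nil => simp [pvScanA]
    | cons b r =>
      rw [pvScanA]
      by_cases hC : (a = u ∧ b = v) ∨ (a = v ∧ b = u)
      · have hb : ((a == u && b == v) || (a == v && b == u)) = true := by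
          simp only [Bool.or_eq_true, Bool.and_eq_true, beq_iff_eq]; tauto
        rw [hb]
        simp only [if_true, true_iff]
        exact ⟨0, by simp, by simpa using hC⟩
      · have hb : ((a == u && b == v) || (a == v && b == u)) = false := by
          simp only [Bool.or_eq_false_iff, Bool.and_eq_false_iff, beq_eq_false_iff_ne, ne_eq]
          tauto
        rw [hb]
        simp only [Bool.false_eq_true, if_false]
        rw [ih]
        constructor
        · rintro ⟨k, hk, h⟩
          exact ⟨k + 1, by simp at hk ⊢; omega, by simpa [List.getD_cons_succ] using h⟩
        · rintro ⟨k, hk, h⟩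
          cases k with
          | zero => simp at h; tauto
          | succ k' =>
            exact ⟨k', by simp at hk ⊢; omega, by simpa [List.getD_cons_succ] using h⟩

-- the pair existential is the neighbour existential.
theorem pvPair_iff_match (u v : Int) (p : List Int) :
    (∃ k, k + 1 < p.length ∧
        ((p.getD k 0 = u ∧ p.getD (k + 1) 0 = v) ∨ (p.getD k 0 = v ∧ p.getD (k + 1) 0 = u)))
      ↔ ∃ m, pvMatchAt p u v m := by
  constructor
  · rintro ⟨k, hk, h | h⟩
    · exact ⟨k, by omega, h.1, Or.inl ⟨hk, h.2⟩⟩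
    · exact ⟨k + 1, hk, h.2, Or.inr ⟨by omega, by simpa using h.1⟩⟩
  · rintro ⟨m, hm, hu, ⟨h1, h2⟩ | ⟨h1, h2⟩⟩
    · exact ⟨m, h1, Or.inl ⟨hu, h2⟩⟩
    · obtain ⟨m', rfl⟩ : ∃ m', m = m' + 1 := ⟨m - 1, by omega⟩
      exact ⟨m', by omega, Or.inr ⟨by simpa using h2, hu⟩⟩

theorem pvCrosses_iff (p : List Int) (u v : Int) (start : Nat) :
    pvCrosses p u v start = true ↔ ∃ m, start ≤ m ∧ pvMatchAt p u v m := by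
  suffices H : ∀ fuel s, p.length - s ≤ fuel →
      (pvCrosses p u v s = true ↔ ∃ m, s ≤ m ∧ pvMatchAt p u v m) from
    H p.length start (Nat.sub_le _ _)
  intro fuel
  induction fuel with
  | zero =>
    intro s hle
    rw [pvCrosses]
    cases hidx : PySem.List.index? (p.drop s) u with
    | none =>
      simp only [Bool.false_eq_true, false_iff]
      rintro ⟨m, hm, hlt, -⟩
      exact absurd hlt (by omega)
    | some j =>
      exfalso
      obtain ⟨hk, -, -⟩ := PySem.List.getElem_of_index?_eq_some hidx
      simp at hk
      omega
  | succ n ih =>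
    intro s hle
    rw [pvCrosses]
    cases hidx : PySem.List.index? (p.drop s) u with
    | none =>
      simp only [Bool.false_eq_true, false_iff]
      rintro ⟨m, hm, hlt, hu, -⟩
      have : u ∈ p.drop s := by
        have h1 : m - s < (p.drop s).length := by simp; omega
        have : (p.drop s)[m - s] = u := by
          rw [List.getElem_drop]
          rw [List.getD_eq_getElem p 0 hlt] at hu
          simpa [Nat.add_sub_cancel' hm] using hu
        exact this ▸ List.getElem_mem h1
      rw [PySem.List.index?_eq_none_iff] at hidx
      exact hidx this
    | some j =>
      obtain ⟨hk, hget, hfirst⟩ := PySem.List.getElem_of_index?_eq_some hidx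
      have hklen : j < p.length - s := by simpa using hk
      have hu : p.getD (s + j) 0 = u := by
        rw [List.getElem_drop] at hget
        rw [List.getD_eq_getElem p 0 (by omega)]
        exact hget
      by_cases hc : ((decide (s + j + 1 < p.length) && (p.getD (s + j + 1) 0 == v))
         || (decide (0 < s + j) && (p.getD (s + j - 1) 0 == v))) = true
      · simp only [hc, if_true, true_iff]
        refine ⟨s + j, by omega, by omega, hu, ?_⟩
        simpa [Bool.or_eq_true, Bool.and_eq_true, decide_eq_true_eq, beq_iff_eq] using hc
      · simp only [hc, Bool.false_eq_true, if_false]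
        rw [ih (s + j + 1) (by omega)]
        constructor
        · rintro ⟨m, hm, hM⟩
          exact ⟨m, by omega, hM⟩
        · rintro ⟨m, hm, hM⟩
          refine ⟨m, ?_, hM⟩
          -- m ≠ s + j (the check failed there), and m is not an earlier occurrence of u
          by_contra hlt
          push Not at hlt
          obtain ⟨hmlen, hmu, hnb⟩ := hM
          rcases Nat.lt_or_ge m (s + j) with hless | hge
          · -- an occurrence of u strictly before the first one found
            have h1 : m - s < j := by omega
            have : (p.drop s)[m - s]'(by simp; omega) = u := by
              rw [List.getElem_drop]
              rw [List.getD_eq_getElem p 0 hmlen] at hmu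
              simpa [Nat.add_sub_cancel' hm] using hmu
            exact hfirst (m - s) h1 this
          · have hmeq : m = s + j := by omega
            apply hc
            subst hmeq
            rcases hnb with ⟨h1, h2⟩ | ⟨h1, h2⟩
            · simp only [Bool.or_eq_true, Bool.and_eq_true, decide_eq_true_eq, beq_iff_eq]
              exact Or.inl ⟨h1, h2⟩
            · simp only [Bool.or_eq_true, Bool.and_eq_true, decide_eq_true_eq, beq_iff_eq]
              exact Or.inr ⟨h1, h2⟩

theorem pvCrosses_eq_scan (p : List Int) (u v : Int) :
    pvCrosses p u v 0 = pvScanA u v p := by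
  rw [Bool.eq_iff_iff, pvCrosses_iff, pvScanA_iff, pvPair_iff_match]
  simp

-- ===== VERDICT (by name: the statement is the Claim_ definition above) =====
theorem count_paths_per_edges_spec : Claim_equal_count_paths_per_edges := by
  intro paths edge _
  unfold Spec_count_paths_per_edges count_paths_per_edges count_paths_per_edges_alt
  apply PySem.List.foldl_congr_mem
  intro count path _
  rw [pvCrosses_eq_scan]
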